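-- pv_equiv track=rewrite | github.com/eronekogin/leetcode | 2025/make_k_subarray_sums_equal.py | make_sub_k_sum_equal
-- ===== SOURCE A (Python) =====
-- from math import gcd
--
-- def make_sub_k_sum_equal(arr: list[int], k: int) -> int:
--     """
--     Since we need to make sub array with length k equal, which means
--     * if the array is not circular, every kth element should be the same
--         after the operations, which means a[0] = a[k]
--     * if the array is circular, we need every gcd(n, k) th element be
--         the same after the operations.
--     """
--     n = len(arr)
--     g = gcd(n, k)
--     cnt = 0
--
--     for i in range(g):
--         tmp = sorted(arr[i::g])
--         m = tmp[len(tmp) >> 1]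
--         cnt += sum(abs(x - m) for x in tmp)
--
--     return cnt
-- ===== SOURCE B (Python) =====
-- from math import gcd
--
--
-- def _select(xs, j):
--     """j-th smallest element of non-empty xs (iterative quickselect, middle pivot)."""
--     while True:
--         pivot = xs[len(xs) >> 1]
--         lt = [x for x in xs if x < pivot]
--         if j < len(lt):
--             xs = lt
--             continue
--         eq = 0
--         for x in xs:
--             if x == pivot:
--                 eq += 1
--         if j < len(lt) + eq:
--             return pivot
--         xs = [x for x in xs if x > pivot]
--         j -= len(lt) + eq
--
--
-- def make_sub_k_sum_equal(arr: list[int], k: int) -> int: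
--     n = len(arr)
--     g = gcd(n, k)
--     total = 0
--     for i in range(g):
--         group = arr[i::g]
--         m = _select(group, len(group) >> 1)
--         for x in group:
--             total += x - m if x >= m else m - x
--     return total
-- ===== Notes on version B (the rewrite author's own statement) =====
-- stated objective: alternative
-- what changed: B finds each group's median with an iterative quickselect (middle pivot, three-way partition) instead of fully sorting the group, and sums absolute deviations over the unsorted group; asymptotically lighter but not measurably faster under CPython (hand-written partitioning vs the C-implemented sort).
import Mathlib
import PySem

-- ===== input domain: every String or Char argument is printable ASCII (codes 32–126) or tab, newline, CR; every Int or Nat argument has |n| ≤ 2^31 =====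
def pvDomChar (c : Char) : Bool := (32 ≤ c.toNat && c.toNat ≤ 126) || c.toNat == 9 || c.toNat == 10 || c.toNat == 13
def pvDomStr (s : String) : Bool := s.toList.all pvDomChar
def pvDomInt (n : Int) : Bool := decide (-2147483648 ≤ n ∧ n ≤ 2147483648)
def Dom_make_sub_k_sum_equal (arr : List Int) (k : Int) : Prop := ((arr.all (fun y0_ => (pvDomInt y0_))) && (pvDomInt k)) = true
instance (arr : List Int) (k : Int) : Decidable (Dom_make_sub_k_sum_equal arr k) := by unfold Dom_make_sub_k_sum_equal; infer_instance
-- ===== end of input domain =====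

-- B replaces the per-group full sort by an iterative quickselect of the median (middle pivot)
-- and sums the absolute deviations over the unsorted group; the grouping arr[i::g] is shared plumbing.

-- ===== PORT A =====
def make_sub_k_sum_equal (arr : List Int) (k : Int) : Int :=
  let n : Int := (arr.length : Int)
  let g : Int := (Int.gcd n k : Int)
  (PySem.List.pyRange 0 g 1).foldl (fun cnt i =>
    let tmp := PySem.List.sorted ((PySem.List.slice? arr (some i) none g).getD []) (fun x => x)
    -- tmp[len(tmp) >> 1]: IndexError (none) exactly when tmp = []; Pre_ excludes that
    let m := (PySem.List.pyGet? tmp ((tmp.length : Int) >>> (1 : Nat))).getD 0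
    cnt + (tmp.map (fun x => |x - m|)).sum) 0

-- ===== PORT B =====
-- the middle element, used as quickselect pivot (xs[len(xs) >> 1]; membership needed for termination)
theorem pvPivot_mem (xs : List Int) (hx : xs ≠ []) :
    (PySem.List.pyGet? xs ((xs.length : Int) >>> (1 : Nat))).getD 0 ∈ xs := by
  have h1 : ((xs.length : Int) >>> (1 : Nat)) = ((xs.length >>> 1 : Nat) : Int) := by
    simp [Int.natCast_shiftRight]
  have h2 : xs.length >>> 1 < xs.length := by
    have : 0 < xs.length := List.length_pos_iff.mpr hx
    simp only [Nat.shiftRight_eq_div_pow, pow_one]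
    omega
  rw [h1, PySem.List.pyGet?_natCast, List.getElem?_eq_getElem h2]
  exact List.getElem_mem h2

theorem pvFilterAttach_len {α : Type} (xs : List α) (q : {x // x ∈ xs} → Bool) (e : α)
    (he : e ∈ xs) (hq : q ⟨e, he⟩ = false) :
    (List.filter q xs.attach).length < xs.length := by
  have h : (List.filter q xs.attach).length < xs.attach.length :=
    List.length_filter_lt_length_iff_exists.mpr ⟨⟨e, he⟩, List.mem_attach _ _, by simp [hq]⟩
  simpa using h

def pvSelect (xs : List Int) (j : Int) : Int :=
  if hx : xs = [] then 0
  else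
    let pivot := (PySem.List.pyGet? xs ((xs.length : Int) >>> (1 : Nat))).getD 0
    let lt := xs.filter (fun x => decide (x < pivot))
    if j < (lt.length : Int) then pvSelect lt j
    else
      let eqc := xs.foldl (fun c x => if x = pivot then c + 1 else c) (0 : Int)
      if j < (lt.length : Int) + eqc then pivot
      else pvSelect (xs.filter (fun x => decide (pivot < x))) (j - ((lt.length : Int) + eqc))
termination_by xs.length
decreasing_by
  all_goals simp only [List.length_unattach]
  · refine pvFilterAttach_len xs _ _ (pvPivot_mem xs hx) ?_
    exact decide_eq_false (lt_irrefl _)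
  · refine pvFilterAttach_len xs _ _ (pvPivot_mem xs hx) ?_
    exact decide_eq_false (lt_irrefl _)

def make_sub_k_sum_equal_alt (arr : List Int) (k : Int) : Int :=
  let n : Int := (arr.length : Int)
  let g : Int := (Int.gcd n k : Int)
  (PySem.List.pyRange 0 g 1).foldl (fun total i =>
    let group := (PySem.List.slice? arr (some i) none g).getD []
    let m := pvSelect group ((group.length : Int) >>> (1 : Nat))
    group.foldl (fun t x => t + (if m ≤ x then x - m else m - x)) total) 0

-- ===== PRECONDITION & SPEC =====
-- Pre_ excludes exactly the inputs where Python A raises IndexError: an empty arr with k ≠ 0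
-- (then g = |k| > 0 and every group arr[i::g] is empty, so tmp[0] raises).
def Pre_make_sub_k_sum_equal (arr : List Int) (k : Int) : Prop := arr = [] → k = 0
instance (arr : List Int) (k : Int) : Decidable (Pre_make_sub_k_sum_equal arr k) := by unfold Pre_make_sub_k_sum_equal; infer_instance
def pvWitness_make_sub_k_sum_equal : List Int × Int := ([1, 3, 2, 4], 2)

def Spec_make_sub_k_sum_equal (arr : List Int) (k : Int) (out : Int) : Prop := out = make_sub_k_sum_equal_alt arr k
instance (arr : List Int) (k : Int) (out : Int) : Decidable (Spec_make_sub_k_sum_equal arr k out) := by unfold Spec_make_sub_k_sum_equal; infer_instance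

-- ===== CLAIM (what is proved, stated in full; the proofs are below) =====
def Claim_equal_make_sub_k_sum_equal : Prop := ∀ (arr : List Int) (k : Int), Dom_make_sub_k_sum_equal arr k → Pre_make_sub_k_sum_equal arr k → Spec_make_sub_k_sum_equal arr k (make_sub_k_sum_equal arr k)

-- ===== LEMMAS AND PROOFS =====

theorem pvShift_one (L : Nat) : ((L : Int) >>> (1 : Nat)) = ((L >>> 1 : Nat) : Int) := by
  simp [Int.natCast_shiftRight]

theorem pvShift_lt (L : Nat) (h : 0 < L) : L >>> 1 < L := by
  simp only [Nat.shiftRight_eq_div_pow, pow_one]; omega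

-- sorted(xs) decomposes around any pivot value p into sorted(<p) ++ copies of p ++ sorted(>p)
theorem pvSorted_split (xs : List Int) (p : Int) :
    PySem.List.sorted xs (fun x => x) =
      PySem.List.sorted (xs.filter (fun x => decide (x < p))) (fun x => x)
        ++ List.replicate (xs.countP (fun x => decide (x = p))) p
        ++ PySem.List.sorted (xs.filter (fun x => decide (p < x))) (fun x => x) := by
  have e1 : (xs.filter (fun x => !decide (x < p))).filter (fun x => decide (x = p))
      = xs.filter (fun x => decide (x = p)) := by
    rw [List.filter_filter]
    apply List.filter_congr
    intro x _
    rcases lt_trichotomy x p with h|h|h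
    · simp [h, h.ne]
    · simp [h]
    · simp [h.ne', not_lt_of_gt h]
  have e2 : (xs.filter (fun x => !decide (x < p))).filter (fun x => !decide (x = p))
      = xs.filter (fun x => decide (p < x)) := by
    rw [List.filter_filter]
    apply List.filter_congr
    intro x _
    rcases lt_trichotomy x p with h|h|h
    · simp [h, h.ne, not_lt_of_gt h]
    · simp [h]
    · simp [h, h.ne', not_lt_of_gt h]
  have e3 : xs.filter (fun x => decide (x = p)) = List.replicate (xs.countP (fun x => decide (x = p))) p := by
    rw [List.eq_replicate_iff]
    refine ⟨(List.countP_eq_length_filter).symm, ?_⟩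
    intro b hb
    have := (List.mem_filter.mp hb).2
    simpa using this
  have prep : (List.replicate (xs.countP (fun x => decide (x = p))) p).Perm
      (xs.filter (fun x => decide (x = p))) := by rw [← e3]
  rw [List.append_assoc]
  apply PySem.List.sorted_id_eq_of_perm_of_pairwise
  · refine ((PySem.List.sorted_perm _ _ _).append (prep.append (PySem.List.sorted_perm _ _ _))).trans ?_
    rw [← e1, ← e2]
    exact ((List.Perm.refl _).append (List.filter_append_perm _ _)).trans (List.filter_append_perm _ _)
  · rw [List.pairwise_append]
    refine ⟨PySem.List.sorted_pairwise _ _, ?_, ?_⟩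
    · rw [List.pairwise_append]
      refine ⟨List.pairwise_replicate.mpr (Or.inr le_rfl), PySem.List.sorted_pairwise _ _, ?_⟩
      intro a ha b hb
      have ha' : a = p := List.eq_of_mem_replicate ha
      have hb' : p < b := by
        have := (List.mem_filter.mp ((PySem.List.mem_sorted _ _ _ _).mp hb)).2
        simpa using this
      omega
    · intro a ha b hb
      have ha' : a < p := by
        have := (List.mem_filter.mp ((PySem.List.mem_sorted _ _ _ _).mp ha)).2
        simpa using this
      rcases List.mem_append.mp hb with hb | hb
      · have : b = p := List.eq_of_mem_replicate hb
        omega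
      · have : p < b := by
          have := (List.mem_filter.mp ((PySem.List.mem_sorted _ _ _ _).mp hb)).2
          simpa using this
        omega

-- quickselect returns the j-th element of the sorted list
theorem pvSelect_sorted : ∀ (N : Nat), ∀ (xs : List Int) (j : Nat), xs.length ≤ N → j < xs.length →
    pvSelect xs (j : Int) = (PySem.List.sorted xs (fun x => x)).getD j 0 := by
  intro N
  induction N with
  | zero => intro xs j h hj; omega
  | succ N ih =>
    intro xs j hN hj
    have hx : xs ≠ [] := by intro h; subst h; simp at hj
    rw [pvSelect]
    simp only [dif_neg hx]
    set p := (PySem.List.pyGet? xs ((xs.length : Int) >>> (1 : Nat))).getD 0 with hp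
    set lt := xs.filter (fun x => decide (x < p)) with hlt
    set c := xs.countP (fun x => decide (x = p)) with hc
    set gt := xs.filter (fun x => decide (p < x)) with hgt
    have hpm : p ∈ xs := pvPivot_mem xs hx
    have hsplit := pvSorted_split xs p
    rw [← hlt, ← hc, ← hgt] at hsplit
    have hlen : xs.length = lt.length + c + gt.length := by
      have h := congrArg List.length hsplit
      simp only [PySem.List.length_sorted, List.length_append, List.length_replicate] at h
      omega
    have heqc : xs.foldl (fun a x => if x = p then a + 1 else a) (0 : Int) = (c : Int) := by
      have h := PySem.List.foldl_count_if (fun x => decide (x = p)) xs 0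
      simpa using h
    have hltlen : lt.length < xs.length :=
      List.length_filter_lt_length_iff_exists.mpr ⟨p, hpm, by simp⟩
    have hgtlen : gt.length < xs.length :=
      List.length_filter_lt_length_iff_exists.mpr ⟨p, hpm, by simp⟩
    rw [heqc]
    by_cases h1 : (j : Int) < (lt.length : Int)
    · rw [if_pos h1]
      have hjlt : j < lt.length := by exact_mod_cast h1
      rw [ih lt j (by omega) hjlt, hsplit, List.append_assoc, List.getD_append _ _ _ _ (by rw [PySem.List.length_sorted]; exact hjlt)]
    · rw [if_neg h1]
      have hjge : lt.length ≤ j := by omega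
      by_cases h2 : (j : Int) < (lt.length : Int) + (c : Int)
      · rw [if_pos h2]
        have hjc : j - lt.length < c := by omega
        rw [hsplit, List.append_assoc,
          List.getD_append_right _ _ _ _ (by rw [PySem.List.length_sorted]; exact hjge),
          PySem.List.length_sorted,
          List.getD_append _ _ _ _ (by simpa using hjc),
          List.getD_eq_getElem _ _ (by simpa using hjc), List.getElem_replicate]
      · rw [if_neg h2]
        have hjge2 : lt.length + c ≤ j := by omega
        set j' : Nat := j - (lt.length + c) with hj'
        have hcast : (j : Int) - ((lt.length : Int) + (c : Int)) = (j' : Int) := by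
          rw [hj']; omega
        have hjgt : j' < gt.length := by omega
        have hNgt : gt.length ≤ N := by omega
        rw [hcast, ih gt j' hNgt hjgt, hsplit, List.append_assoc,
          List.getD_append_right _ _ _ _ (by rw [PySem.List.length_sorted]; exact hjge),
          PySem.List.length_sorted,
          List.getD_append_right _ _ _ _ (by rw [List.length_replicate]; omega),
          List.length_replicate]
        congr 1
        omega

-- per-group: A's sorted-median cost equals B's quickselect cost
theorem pvGroup_eq (G : List Int) (cnt : Int) :
    (cnt + ((PySem.List.sorted G (fun x => x)).map (fun x =>
        |x - (PySem.List.pyGet? (PySem.List.sorted G (fun x => x))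
            (((PySem.List.sorted G (fun x => x)).length : Int) >>> (1 : Nat))).getD 0|)).sum)
    = G.foldl (fun t x => t + (if pvSelect G ((G.length : Int) >>> (1 : Nat)) ≤ x
        then x - pvSelect G ((G.length : Int) >>> (1 : Nat))
        else pvSelect G ((G.length : Int) >>> (1 : Nat)) - x)) cnt := by
  rw [PySem.List.foldl_add]
  by_cases hG : G = []
  · subst hG; simp [PySem.List.sorted]
  · have hL : 0 < G.length := List.length_pos_iff.mpr hG
    have hlen : (PySem.List.sorted G (fun x => x)).length = G.length := PySem.List.length_sorted _ _ _
    have hm : (PySem.List.pyGet? (PySem.List.sorted G (fun x => x))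
          (((PySem.List.sorted G (fun x => x)).length : Int) >>> (1 : Nat))).getD 0
        = (PySem.List.sorted G (fun x => x)).getD (G.length >>> 1) 0 := by
      rw [hlen, pvShift_one, PySem.List.pyGet?_natCast, List.getD_eq_getElem?_getD]
    have hsel : pvSelect G ((G.length : Int) >>> (1 : Nat))
        = (PySem.List.sorted G (fun x => x)).getD (G.length >>> 1) 0 := by
      rw [pvShift_one]
      exact pvSelect_sorted G.length G (G.length >>> 1) le_rfl (pvShift_lt _ hL)
    rw [hm, hsel]
    set m := (PySem.List.sorted G (fun x => x)).getD (G.length >>> 1) 0 with hmdef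
    congr 1
    have hpt : (fun x => if m ≤ x then x - m else m - x) = (fun x : Int => |x - m|) := by
      funext x
      by_cases hx : m ≤ x
      · rw [if_pos hx, abs_of_nonneg (by omega)]
      · rw [if_neg hx, abs_of_neg (by omega)]; omega
    rw [hpt]
    exact (((PySem.List.sorted_perm G (fun x => x) false).map _).sum_eq)

-- ===== VERDICT (by name: the statement is the Claim_ definition above) =====
theorem make_sub_k_sum_equal_spec : Claim_equal_make_sub_k_sum_equal := by
  intro arr k _ _
  unfold Spec_make_sub_k_sum_equal make_sub_k_sum_equal make_sub_k_sum_equal_alt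
  refine congrArg (fun f => List.foldl f (0 : Int) (PySem.List.pyRange 0 ((Int.gcd (arr.length : Int) k : Nat) : Int) 1)) ?_
  funext cnt i
  exact pvGroup_eq _ cnt
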